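-- pv_equiv track=rewrite | github.com/PSC-INF02/psc | src/abstracter/parsers/retriever.py | retrieve_names_only
-- ===== SOURCE A (Python) =====
-- def _links_to(entity_list, name):
--     """
--     Return the whole name of sth or sb, given the list of entities in the text.
--     For example, Wayne in the list ["Wayne Rooney", "Tom"]
--     refers obviously to "Wayne Rooney".
--     We thus avoid taking a Family Name or a First Name for the whole name.
--     @warning This function is local, some similar calculations may
--     be done in other files, in different ways.
--
--     @param entity_list List of entities (string).
--     @param name A name (string).
--     @return A full name (string).
--     """
--     if entity_list:
--         temp = name
--         for e in entity_list:
--             if temp in e: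
--                 temp = e
--         return temp
--     return None
--
-- def get_names(sents):
--     """
--     @brief Get all named entities in previously tagged sentences.
--
--     This is a very simple names detector.
--     It concatenates every object tagged as 'NNP', to
--     obtain single words but also multiple-words names.
--
--     @param sents Generator of tagged sentences (list of [word,POS])
--     @return A list of named entities.
--     """
--     named_entities = []
--     for sent in sents:
--         temp = []
--         for key, val in sent:
--             if val == 'NNP':
--                 temp.append(key)
--             else:  # end of name
--                 if temp:
--                     named_entities.append(' '.join(temp))
--                 temp = []
--     return named_entities
--
-- def retrieve_names_only(sents):
--     """
--     Retrieve names and count their occurrences in a dictionary.\n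
--     Thus, if a name is used n times, it is counted n times.
--
--     It could still be improved by looking into an already existing
--     list of names, but it is important
--     to begin with no information.
--
--     @param sents Generator of tagged sentences (list of [word,POS]).
--     @return List of names (string).
--     """
--     names = list(s.lower() for s in get_names(sents))
--     res = {}
--     for name in names:
--         name2 = _links_to(names, name)
--         if name2 not in res:
--             res[name2] = 1
--         else:
--             res[name2] = res[name2] + 1
--     return res
-- ===== SOURCE B (Python) =====
-- def _full_name(names, name):
--     """Resolve a possibly partial name to the longest chained match in names."""
--     full = name
--     for e in names:
--         if full in e:
--             full = e
--     return full
--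
--
-- def _sentence_names(sent):
--     """Named entities of one tagged sentence: each maximal run of 'NNP'
--     tokens is recorded as a span [start:i) and joined when it closes."""
--     names = []
--     start = None
--     for i, (word, tag) in enumerate(sent):
--         if tag == 'NNP':
--             if start is None:
--                 start = i
--         else:
--             if start is not None:
--                 names.append(' '.join(w for w, _ in sent[start:i]))
--             start = None
--     return names
--
--
-- def retrieve_names_only(sents):
--     names = []
--     for sent in sents:
--         names += [n.lower() for n in _sentence_names(sent)]
--     counts = {}
--     for n in names:
--         counts[n] = counts.get(n, 0) + 1
--     res = {}
--     for name, k in counts.items():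
--         full = _full_name(names, name)
--         res[full] = res.get(full, 0) + k
--     return res
-- ===== Notes on version B (the rewrite author's own statement) =====
-- stated objective: alternative
-- what changed: B extracts names by tracking run spans (start index + slice) instead of accumulating a word buffer, and replaces A's per-occurrence resolve-and-increment loop with a tally-then-aggregate pass: it first counts the lower-cased names in a dict, then resolves each distinct name once and adds its multiplicity to the resolved key.
import Mathlib
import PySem

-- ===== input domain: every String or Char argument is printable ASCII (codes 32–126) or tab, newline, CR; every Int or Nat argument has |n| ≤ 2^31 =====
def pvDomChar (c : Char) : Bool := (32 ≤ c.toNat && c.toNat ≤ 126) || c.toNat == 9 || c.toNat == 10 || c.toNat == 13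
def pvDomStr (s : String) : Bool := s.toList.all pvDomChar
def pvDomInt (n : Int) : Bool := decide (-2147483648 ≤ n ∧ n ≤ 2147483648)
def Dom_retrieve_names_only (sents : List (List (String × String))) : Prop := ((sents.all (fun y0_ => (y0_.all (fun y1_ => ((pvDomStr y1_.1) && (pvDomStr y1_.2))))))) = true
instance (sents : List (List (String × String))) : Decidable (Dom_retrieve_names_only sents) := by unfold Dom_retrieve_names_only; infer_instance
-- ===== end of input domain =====

-- B tracks NNP run spans by start index and slices them out, and counts by tallying the names
-- first and aggregating each distinct name once, instead of A's per-occurrence increment loop.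


-- ===== PORT A =====

-- _links_to: chain the name through the entity list ("temp in e" is substring containment)
def pvChainA (entityList : List String) (name : String) : String :=
  entityList.foldl (fun temp e => if PySem.Str.isIn temp e then e else temp) name

def pvLinksTo (entityList : List String) (name : String) : Option String :=
  if entityList ≠ [] then some (pvChainA entityList name) else none

-- get_names: per-token state machine; state = (named_entities, current run 'temp')
def pvGetNames (sents : List (List (String × String))) : List String :=
  sents.foldl (fun named sent =>
    (sent.foldl (fun (st : List String × List String) kv =>
        if kv.2 = "NNP" then (st.1, st.2 ++ [kv.1])
        else ((if st.2 ≠ [] then st.1 ++ [PySem.Str.join " " st.2] else st.1), ([] : List String)))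
      (named, ([] : List String))).1) []

def retrieve_names_only (sents : List (List (String × String))) : List (String × Int) :=
  let names := (pvGetNames sents).map PySem.Str.lower
  (names.foldl (fun res name =>
    -- inside the loop names ≠ [], so pvLinksTo always returns some; the default never fires
    let name2 := (pvLinksTo names name).getD name
    match res.get? name2 with
    | none   => res.insert name2 1
    | some v => res.insert name2 (v + 1)) (PySem.Dict.empty : PySem.Dict String Int)).items

-- ===== PORT B =====

def pvFullName (names : List String) (name : String) : String :=
  names.foldl (fun full e => if PySem.Str.isIn full e then e else full) name

-- one token of _sentence_names: state = (names, start); sent is the whole sentence (for the slice)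
def pvStepB (sent : List (String × String)) (st : List String × Option Int)
    (p : Int × (String × String)) : List String × Option Int :=
  if p.2.2 = "NNP" then
    (st.1, match st.2 with | none => some p.1 | some s => some s)
  else
    ((match st.2 with
      | some s => st.1 ++ [PySem.Str.join " " ((PySem.List.slice sent (some s) (some p.1)).map (·.1))]
      | none => st.1), none)

def pvSentenceNames (sent : List (String × String)) : List String :=
  ((PySem.List.enumerate sent 0).foldl (pvStepB sent) ([], none)).1

def retrieve_names_only_alt (sents : List (List (String × String))) : List (String × Int) :=
  let names := sents.foldl (fun acc sent => acc ++ (pvSentenceNames sent).map PySem.Str.lower) []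
  let counts := names.foldl (fun (d : PySem.Dict String Int) n => d.insert n (d.getD n 0 + 1))
    (PySem.Dict.empty : PySem.Dict String Int)
  (counts.items.foldl (fun (res : PySem.Dict String Int) p =>
      let full := pvFullName names p.1
      res.insert full (res.getD full 0 + p.2)) (PySem.Dict.empty : PySem.Dict String Int)).items

-- ===== PRECONDITION & SPEC =====
def Spec_retrieve_names_only (sents : List (List (String × String))) (out : List (String × Int)) : Prop := out = retrieve_names_only_alt sents
instance (sents : List (List (String × String))) (out : List (String × Int)) : Decidable (Spec_retrieve_names_only sents out) := by unfold Spec_retrieve_names_only; infer_instance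

-- ===== CLAIM (what is proved, stated in full; the proofs are below) =====
def Claim_equal_retrieve_names_only : Prop := ∀ (sents : List (List (String × String))), Dom_retrieve_names_only sents → Spec_retrieve_names_only sents (retrieve_names_only sents)

-- ===== LEMMAS AND PROOFS =====

-- A's inner step function (definitionally the lambda inside pvGetNames)
def pvStepA (st : List String × List String) (kv : String × String) : List String × List String :=
  if kv.2 = "NNP" then (st.1, st.2 ++ [kv.1])
  else ((if st.2 ≠ [] then st.1 ++ [PySem.Str.join " " st.2] else st.1), ([] : List String))

theorem pvGetNames_eq_stepA (sents : List (List (String × String))) :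
    pvGetNames sents = sents.foldl (fun named sent => (sent.foldl pvStepA (named, [])).1) [] := rfl

-- B's step only appends to the names accumulator
theorem pvStepB_shift (sent : List (String × String)) (nm : List String) (st : Option Int)
    (x : Int × (String × String)) :
    pvStepB sent (nm, st) x = (nm ++ (pvStepB sent ([], st) x).1, (pvStepB sent ([], st) x).2) := by
  obtain ⟨i, w, t⟩ := x
  unfold pvStepB
  by_cases ht : t = "NNP" <;> cases st <;> simp [ht]

theorem pvFoldB_shift (sent : List (String × String)) :
    ∀ (l : List (Int × (String × String))) (nm : List String) (st : Option Int),
      (l.foldl (pvStepB sent) (nm, st)).1 = nm ++ (l.foldl (pvStepB sent) ([], st)).1 := by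
  intro l
  induction l with
  | nil => simp
  | cons x xs ih =>
    intro nm st
    simp only [List.foldl_cons]
    rw [pvStepB_shift, ih]
    conv_rhs =>
      rw [show pvStepB sent ([], st) x
            = ((pvStepB sent ([], st) x).1, (pvStepB sent ([], st) x).2) from rfl, ih]
    simp

-- the joint invariant: A's run buffer is the word slice of B's open span
theorem pvExtract : ∀ (r p : List (String × String)) (nm run : List String) (start : Option Int),
    ((start = none ∧ run = []) ∨
      (∃ s : Nat, start = some (s : Int) ∧ s < p.length ∧ run = (p.drop s).map (·.1))) →
    (r.foldl pvStepA (nm, run)).1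
      = ((PySem.List.enumerate r (p.length : Int)).foldl (pvStepB (p ++ r)) (nm, start)).1 := by
  intro r
  induction r with
  | nil => intro p nm run start _; simp [PySem.List.enumerate_nil]
  | cons x r' ih =>
    intro p nm run start hinv
    obtain ⟨w, t⟩ := x
    rw [PySem.List.enumerate_cons]
    simp only [List.foldl_cons]
    have hpp : p ++ (w, t) :: r' = (p ++ [(w, t)]) ++ r' := by simp
    have hlen : ((p ++ [(w, t)]).length : Int) = (p.length : Int) + 1 := by
      simp [List.length_append]
    by_cases ht : t = "NNP"
    · rcases hinv with ⟨hs, hr⟩ | ⟨s, hs, hlt, hr⟩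
      · subst hs; subst hr
        have hstepA : pvStepA (nm, []) (w, t) = (nm, [w]) := by simp [pvStepA, ht]
        have hstepB : pvStepB (p ++ (w, t) :: r') (nm, none) ((p.length : Int), (w, t))
            = (nm, some (p.length : Int)) := by simp [pvStepB, ht]
        rw [hstepA, hstepB, hpp, ← hlen,
          ih (p ++ [(w, t)]) nm [w] (some (p.length : Int))
            (Or.inr ⟨p.length, rfl, by simp, by simp [List.drop_left']⟩)]
      · subst hs; subst hr
        have hstepA : pvStepA (nm, (p.drop s).map (·.1)) (w, t)
            = (nm, (p.drop s).map (·.1) ++ [w]) := by simp [pvStepA, ht]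
        have hstepB : pvStepB (p ++ (w, t) :: r') (nm, some (s : Int)) ((p.length : Int), (w, t))
            = (nm, some (s : Int)) := by simp [pvStepB, ht]
        rw [hstepA, hstepB, hpp, ← hlen,
          ih (p ++ [(w, t)]) nm _ (some (s : Int))
            (Or.inr ⟨s, rfl, by simp; omega,
              by rw [List.drop_append_of_le_length (by omega)]; simp⟩)]
    · rcases hinv with ⟨hs, hr⟩ | ⟨s, hs, hlt, hr⟩
      · subst hs; subst hr
        have hstepA : pvStepA (nm, []) (w, t) = (nm, []) := by simp [pvStepA, ht]
        have hstepB : pvStepB (p ++ (w, t) :: r') (nm, none) ((p.length : Int), (w, t))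
            = (nm, none) := by simp [pvStepB, ht]
        rw [hstepA, hstepB, hpp, ← hlen,
          ih (p ++ [(w, t)]) nm [] none (Or.inl ⟨rfl, rfl⟩)]
      · subst hs; subst hr
        have hrun : (p.drop s).map (·.1) ≠ [] := by
          simp [List.drop_eq_nil_iff]; omega
        have hstepA : pvStepA (nm, (p.drop s).map (·.1)) (w, t)
            = (nm ++ [PySem.Str.join " " ((p.drop s).map (·.1))], []) := by
          simp only [pvStepA, ht, hrun, ne_eq, not_false_eq_true, if_true, if_false]
        have hslice : PySem.List.slice (p ++ (w, t) :: r') (some (s : Int)) (some (p.length : Int))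
            = p.drop s := by
          rw [PySem.List.slice_natCast, List.drop_append_of_le_length (by omega),
            List.take_left' (by simp)]
        have hstepB : pvStepB (p ++ (w, t) :: r') (nm, some (s : Int)) ((p.length : Int), (w, t))
            = (nm ++ [PySem.Str.join " " ((p.drop s).map (·.1))], none) := by
          simp [pvStepB, ht, hslice]
        rw [hstepA, hstepB, hpp, ← hlen,
          ih (p ++ [(w, t)]) _ [] none (Or.inl ⟨rfl, rfl⟩)]

theorem pvSentence_eq (sent : List (String × String)) (named : List String) :
    (sent.foldl pvStepA (named, [])).1 = named ++ pvSentenceNames sent := by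
  have h := pvExtract sent [] named [] none (Or.inl ⟨rfl, rfl⟩)
  simp only [List.nil_append, List.length_nil, Nat.cast_zero] at h
  rw [h, pvFoldB_shift]
  rfl

-- the two ports build the same flat list of lower-cased names
theorem pvNames_eq (sents : List (List (String × String))) :
    (pvGetNames sents).map PySem.Str.lower =
      sents.foldl (fun acc sent => acc ++ (pvSentenceNames sent).map PySem.Str.lower) [] := by
  have h1 : pvGetNames sents = sents.flatMap pvSentenceNames := by
    rw [pvGetNames_eq_stepA]
    rw [PySem.List.foldl_congr_mem _ _ (fun named sent => named ++ pvSentenceNames sent) _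
      (fun acc x _ => pvSentence_eq x acc)]
    rw [PySem.List.foldl_append_eq_flatMap]
    simp
  rw [h1, PySem.List.foldl_append_eq_flatMap]
  simp [List.map_flatMap]

-- n-fold counter increment at one key = one aggregated insert
theorem pvReplFold (k : String) : ∀ (n : Nat), 1 ≤ n → ∀ (res : PySem.Dict String Int),
    (List.replicate n k).foldl (fun d x => d.insert x (d.getD x 0 + 1)) res
      = res.insert k (res.getD k 0 + (n : Int)) := by
  intro n
  induction n with
  | zero => omega
  | succ n ih =>
    intro _ res
    by_cases hn : 1 ≤ n
    · rw [List.replicate_succ, List.foldl_cons, ih hn]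
      rw [PySem.Dict.getD_insert_self, PySem.Dict.insert_insert_self]
      congr 1
      push_cast
      ring
    · have : n = 0 := by omega
      subst this
      simp

theorem pvFoldl_flatMap {α β : Type} (g : α → List β) (φ : PySem.Dict String Int → β → PySem.Dict String Int) :
    ∀ (ds : List α) (init : PySem.Dict String Int),
      (ds.flatMap g).foldl φ init = ds.foldl (fun acc d => (g d).foldl φ acc) init := by
  intro ds
  induction ds with
  | nil => simp
  | cons d rest ih => intro init; simp [List.foldl_append, ih]

theorem pvSumSingle (c : String → Nat) (a : String) : ∀ (ds : List String), ds.Nodup →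
    (ds.map (fun d => if d = a then c d else 0)).sum = if a ∈ ds then c a else 0 := by
  intro ds
  induction ds with
  | nil => simp
  | cons d rest ih =>
    intro hnd
    rw [List.nodup_cons] at hnd
    simp only [List.map_cons, List.sum_cons, List.mem_cons]
    by_cases h : d = a
    · subst h
      have hz : ∀ x ∈ rest, (if x = d then c x else 0) = 0 := by
        intro x hx
        exact if_neg (by rintro rfl; exact hnd.1 hx)
      rw [List.map_congr_left hz]
      simp
    · have h' : a ≠ d := fun e => h e.symm
      rw [if_neg h, ih hnd.2]
      simp [h']

-- grouping a list by its distinct values is a permutation of it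
theorem pvGroupedPerm (l : List String) :
    ((PySem.Set.ofList l).flatMap fun d => List.replicate (l.count d) d).Perm l := by
  rw [List.perm_iff_count]
  intro a
  rw [List.count_flatMap]
  have hmc : (PySem.Set.ofList l).map (List.count a ∘ fun d => List.replicate (l.count d) d)
      = (PySem.Set.ofList l).map (fun d => if d = a then l.count d else 0) := by
    apply List.map_congr_left
    intro d _
    simp [List.count_replicate]
  rw [hmc, pvSumSingle _ _ _ (PySem.Set.nodup_ofList l)]
  by_cases h : a ∈ l
  · simp [PySem.Set.mem_ofList, h]
  · simp [PySem.Set.mem_ofList, h, List.count_eq_zero_of_not_mem h]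

theorem pvUpdateReplicate (k : String) : ∀ (n : Nat), 1 ≤ n → ∀ (s : PySem.Set String),
    PySem.Set.update s (List.replicate n k) = PySem.Set.add s k := by
  intro n
  induction n with
  | zero => omega
  | succ n ih =>
    intro _ s
    by_cases hn : 1 ≤ n
    · rw [List.replicate_succ, PySem.Set.update_cons, ih hn]
      have : k ∈ PySem.Set.add s k := by rw [PySem.Set.mem_add]; right; rfl
      rw [PySem.Set.add_of_mem this]
    · have : n = 0 := by omega
      subst this
      simp [PySem.Set.update]

theorem pvUpdateGrouped (f : String → String) (c : String → Nat) :
    ∀ (ds : List String), (∀ d ∈ ds, 1 ≤ c d) → ∀ (s : PySem.Set String),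
      PySem.Set.update s (ds.flatMap fun d => List.replicate (c d) (f d))
        = PySem.Set.update s (ds.map f) := by
  intro ds
  induction ds with
  | nil => simp
  | cons d rest ih =>
    intro h s
    rw [List.flatMap_cons, PySem.Set.update_append, List.map_cons, PySem.Set.update_cons,
      pvUpdateReplicate (f d) (c d) (h d (by simp)) s, ih (fun q hq => h q (by simp [hq]))]

-- deduplicating before or after a filter is the same
theorem pvFilterOfList (a : String) : ∀ (t : List String),
    (PySem.Set.ofList t).filter (fun y => !(y == a))
      = PySem.Set.ofList (t.filter (fun y => !(y == a))) := by
  intro t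
  induction t with
  | nil => rfl
  | cons b t ih =>
    rw [PySem.Set.ofList_cons, PySem.Set.discard]
    by_cases hb : b = a
    · subst hb
      rw [List.filter_cons_of_neg (by simp), ih]
      have hR : List.filter (fun y => !(y == b)) (b :: t) = List.filter (fun y => !(y == b)) t :=
        List.filter_cons_of_neg (by simp)
      rw [hR]
      apply List.filter_eq_self.mpr
      intro x hx
      rw [PySem.Set.mem_ofList] at hx
      exact List.of_mem_filter (p := fun y => !(y == b)) hx
    · have hba : (fun y => !(y == a)) b = true := by simp [hb]
      rw [List.filter_cons_of_pos (p := fun y => !(y == a)) hba]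
      have hR : List.filter (fun y => !(y == a)) (b :: t) = b :: List.filter (fun y => !(y == a)) t :=
        List.filter_cons_of_pos (p := fun y => !(y == a)) hba
      rw [hR, PySem.Set.ofList_cons, PySem.Set.discard, List.filter_comm, ih]
  -- (discard is by definition a filter; this lemma moves ofList past it)

-- dedup-then-map has the same distinct images, in the same order, as map
theorem pvOfListMapDedup (f : String → String) : ∀ (n : Nat) (l : List String), l.length ≤ n →
    PySem.Set.ofList ((PySem.Set.ofList l).map f) = PySem.Set.ofList (l.map f) := by
  intro n
  induction n with
  | zero =>
    intro l h
    have : l = [] := List.eq_nil_of_length_eq_zero (Nat.le_zero.mp h)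
    subst this; rfl
  | succ n ih =>
    intro l h
    match l with
    | [] => rfl
    | a :: t =>
      have hlen : (t.filter (fun y => !(y == a))).length ≤ n := by
        have := List.length_filter_le (fun y => !(y == a)) t
        simp only [List.length_cons] at h
        omega
      rw [PySem.Set.ofList_cons]
      simp only [PySem.Set.discard]
      rw [pvFilterOfList, List.map_cons, PySem.Set.ofList_cons, ih _ hlen,
        List.map_cons, PySem.Set.ofList_cons]
      congr 1
      simp only [PySem.Set.discard]
      rw [pvFilterOfList, pvFilterOfList]
      congr 1
      rw [List.filter_map, List.filter_map, List.filter_filter]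
      congr 1
      apply List.filter_congr
      intro x _
      by_cases hfx : f x = f a
      · simp [Function.comp, hfx]
      · have hxa : x ≠ a := by rintro rfl; exact hfx rfl
        simp [Function.comp, hfx, hxa]

-- the heart of the equivalence: per-occurrence counting = tally, then per-distinct aggregation
theorem pvCore (N : List String) :
    (N.foldl (fun res name =>
        let name2 := (pvLinksTo N name).getD name
        match res.get? name2 with
        | none   => res.insert name2 1
        | some v => res.insert name2 (v + 1)) (PySem.Dict.empty : PySem.Dict String Int)).items
      = (((N.foldl (fun (d : PySem.Dict String Int) n => d.insert n (d.getD n 0 + 1))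
            PySem.Dict.empty).items).foldl
          (fun (res : PySem.Dict String Int) p =>
            let full := pvFullName N p.1
            res.insert full (res.getD full 0 + p.2))
          (PySem.Dict.empty : PySem.Dict String Int)).items := by
  rw [PySem.Dict.foldl_insert_getD_add_one_eq_counter, PySem.Dict.items_counter, List.foldl_map]
  by_cases hN : N = []
  · subst hN; rfl
  · -- A side: a counter of N.map (pvChainA N)
    have hstep : (fun (res : PySem.Dict String Int) name =>
        let name2 := (pvLinksTo N name).getD name
        match res.get? name2 with
        | none   => res.insert name2 1
        | some v => res.insert name2 (v + 1))
        = (fun res name => res.insert (pvChainA N name) (res.getD (pvChainA N name) 0 + 1)) := by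
      funext res name
      simp only [pvLinksTo, if_pos hN, Option.getD_some]
      rcases hg : res.get? (pvChainA N name) with _ | v
      · simp [PySem.Dict.getD_eq_get?_getD, hg]
      · simp [PySem.Dict.getD_eq_get?_getD, hg]
    rw [hstep]
    have hA : N.foldl (fun (res : PySem.Dict String Int) name =>
          res.insert (pvChainA N name) (res.getD (pvChainA N name) 0 + 1)) PySem.Dict.empty
        = PySem.Dict.counter (N.map (pvChainA N)) := by
      rw [← PySem.Dict.foldl_insert_getD_add_one_eq_counter, List.foldl_map]
    rw [hA, PySem.Dict.items_counter]
    -- B side: each aggregated insert is a replicate of counter increments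
    have hc : ∀ d ∈ PySem.Set.ofList N, 1 ≤ N.count d := by
      intro d hd
      have : d ∈ N := (PySem.Set.mem_ofList N d).mp hd
      exact List.count_pos_iff.mpr this
    have hB : (PySem.Set.ofList N).foldl (fun (res : PySem.Dict String Int) k =>
          res.insert (pvFullName N k) (res.getD (pvFullName N k) 0 + (N.count k : Int)))
          PySem.Dict.empty
        = PySem.Dict.counter ((PySem.Set.ofList N).flatMap
            fun d => List.replicate (N.count d) (pvChainA N d)) := by
      rw [← PySem.Dict.foldl_insert_getD_add_one_eq_counter,
        pvFoldl_flatMap (fun d => List.replicate (N.count d) (pvChainA N d))]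
      apply PySem.List.foldl_congr_mem
      intro acc d hd
      rw [pvReplFold (pvChainA N d) (N.count d) (hc d hd) acc]
      rfl
    show _ = ((PySem.Set.ofList N).foldl (fun (res : PySem.Dict String Int) k =>
          res.insert (pvFullName N k) (res.getD (pvFullName N k) 0 + (N.count k : Int)))
          PySem.Dict.empty).items
    rw [hB, PySem.Dict.items_counter]
    have hMperm : ((PySem.Set.ofList N).flatMap
        fun d => List.replicate (N.count d) (pvChainA N d)).Perm (N.map (pvChainA N)) := by
      have h1 : ((PySem.Set.ofList N).flatMap fun d => List.replicate (N.count d) (pvChainA N d))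
          = ((PySem.Set.ofList N).flatMap fun d => List.replicate (N.count d) d).map (pvChainA N) := by
        rw [List.map_flatMap]
        simp [List.map_replicate]
      rw [h1]
      exact List.Perm.map _ (pvGroupedPerm N)
    have hSet : PySem.Set.ofList ((PySem.Set.ofList N).flatMap
          fun d => List.replicate (N.count d) (pvChainA N d))
        = PySem.Set.ofList (N.map (pvChainA N)) := by
      set D := PySem.Set.ofList N with hD
      rw [← PySem.Set.update_nil_left, ← PySem.Set.update_nil_left,
        pvUpdateGrouped (pvChainA N) (fun d => N.count d) D (hD ▸ hc),
        PySem.Set.update_nil_left, hD]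
      exact pvOfListMapDedup (pvChainA N) N.length N le_rfl
    rw [hSet]
    apply List.map_congr_left
    intro k _
    rw [hMperm.count_eq k]

-- ===== VERDICT (by name: the statement is the Claim_ definition above) =====
theorem retrieve_names_only_spec : Claim_equal_retrieve_names_only := by
  intro sents _
  show retrieve_names_only sents = retrieve_names_only_alt sents
  unfold retrieve_names_only retrieve_names_only_alt
  simp only [pvNames_eq]
  exact pvCore _
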